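-- pv_equiv track=rewrite | github.com/ryoiwata/galvanize_python_self_assessment | ryo_iwata_python_self_assessment/python_challenges/gal_python_restest_challenge_4.py | count_isograms
-- ===== SOURCE A (Python) =====
-- def count_isograms(list_of_words):
--     result = 0
--     for word in list_of_words:
--         char_dict = {}
--         for char in word: #creates a dictionary with letters valued with the frequency of it
--             if char.lower() in char_dict:
--                 char_dict[char.lower()] += 1
--             else:
--                 char_dict[char.lower()] = 1
--         char_values = list(char_dict.values()) #list function must be used because dictionary values can not be iterated through
--         if all(val <= 1 for val in char_values): # all function allows all items in a list to be compared at once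
--             result += 1
--     return(result)
-- ===== SOURCE B (Python) =====
-- def count_isograms(list_of_words):
--     result = 0
--     for word in list_of_words:
--         chars = sorted(c.lower() for c in word)
--         if all(a != b for a, b in zip(chars, chars[1:])):
--             result += 1
--     return result
-- ===== Notes on version B (the rewrite author's own statement) =====
-- stated objective: alternative
-- what changed: B sorts each word's lowercased characters and declares it an isogram iff no two adjacent characters of the sorted list are equal, replacing A's frequency dictionary and all(val<=1) scan with a sort-then-adjacent-scan.
import Mathlib
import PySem

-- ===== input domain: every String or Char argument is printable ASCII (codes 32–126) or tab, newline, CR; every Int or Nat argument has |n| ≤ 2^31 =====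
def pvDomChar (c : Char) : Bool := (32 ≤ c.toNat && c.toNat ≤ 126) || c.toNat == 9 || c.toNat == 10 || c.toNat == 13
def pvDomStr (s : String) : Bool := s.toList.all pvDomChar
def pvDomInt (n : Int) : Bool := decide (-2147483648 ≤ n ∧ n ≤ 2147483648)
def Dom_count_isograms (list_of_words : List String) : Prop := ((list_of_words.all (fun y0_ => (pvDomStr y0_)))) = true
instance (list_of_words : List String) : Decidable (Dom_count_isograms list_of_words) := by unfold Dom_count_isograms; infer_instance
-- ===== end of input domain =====

-- B replaces A's per-word frequency dictionary and its all(val<=1) scan by a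
-- sort-then-adjacent-scan: sort the lowercased characters and accept the word
-- iff no two adjacent sorted characters are equal (objective: alternative).

-- ===== PORT A =====
def count_isograms (list_of_words : List String) : Int :=
  list_of_words.foldl (fun result word =>
    let char_dict : PySem.Dict Char Int := word.toList.foldl (fun d char =>
      if d.contains (PySem.Chars.lowerChar char) then
        d.insert (PySem.Chars.lowerChar char) ((d.get? (PySem.Chars.lowerChar char)).getD 0 + 1)
      else
        d.insert (PySem.Chars.lowerChar char) 1) PySem.Dict.empty
    let char_values := char_dict.values
    if char_values.all (fun val => val ≤ 1) then result + 1 else result) 0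

-- ===== PORT B =====
def count_isograms_alt (list_of_words : List String) : Int :=
  list_of_words.foldl (fun result word =>
    let chars := PySem.List.sorted (word.toList.map PySem.Chars.lowerChar) (fun x => x) false
    if (chars.zip chars.tail).all (fun p => p.1 != p.2) then result + 1 else result) 0

-- ===== PRECONDITION & SPEC =====
def Spec_count_isograms (list_of_words : List String) (out : Int) : Prop := out = count_isograms_alt list_of_words
instance (list_of_words : List String) (out : Int) : Decidable (Spec_count_isograms list_of_words out) := by unfold Spec_count_isograms; infer_instance

-- ===== CLAIM (what is proved, stated in full; the proofs are below) =====
def Claim_equal_count_isograms : Prop := ∀ (list_of_words : List String), Dom_count_isograms list_of_words → Spec_count_isograms list_of_words (count_isograms list_of_words)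

-- ===== LEMMAS AND PROOFS =====

-- A's dict-building step is the standard counter step.
theorem stepA_eq_counter_step (d : PySem.Dict Char Int) (c : Char) :
    (if d.contains (PySem.Chars.lowerChar c) then
       d.insert (PySem.Chars.lowerChar c) ((d.get? (PySem.Chars.lowerChar c)).getD 0 + 1)
     else
       d.insert (PySem.Chars.lowerChar c) 1)
    = d.insert (PySem.Chars.lowerChar c) (d.getD (PySem.Chars.lowerChar c) 0 + 1) := by
  by_cases h : d.contains (PySem.Chars.lowerChar c)
  · simp [h, PySem.Dict.getD]
  · rw [PySem.Dict.contains_eq_isSome_get?] at h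
    simp [PySem.Dict.contains_eq_isSome_get?] at *
    simp [PySem.Dict.getD, Option.isSome_iff_exists] at *
    simp [h]

-- A's per-word test holds iff the lowered character list has no duplicates.
theorem condA_iff_nodup (word : String) :
    ((word.toList.foldl (fun d char =>
        if d.contains (PySem.Chars.lowerChar char) then
          d.insert (PySem.Chars.lowerChar char) ((d.get? (PySem.Chars.lowerChar char)).getD 0 + 1)
        else
          d.insert (PySem.Chars.lowerChar char) 1)
        (PySem.Dict.empty : PySem.Dict Char Int)).values.all
        (fun val => val ≤ 1)) = true
    ↔ (word.toList.map PySem.Chars.lowerChar).Nodup := by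
  have hfold : (word.toList.foldl (fun d char =>
      if d.contains (PySem.Chars.lowerChar char) then
        d.insert (PySem.Chars.lowerChar char) ((d.get? (PySem.Chars.lowerChar char)).getD 0 + 1)
      else
        d.insert (PySem.Chars.lowerChar char) 1)
        (PySem.Dict.empty : PySem.Dict Char Int))
      = PySem.Dict.counter (word.toList.map PySem.Chars.lowerChar) := by
    have hstep : (fun (d : PySem.Dict Char Int) char =>
        if d.contains (PySem.Chars.lowerChar char) then
          d.insert (PySem.Chars.lowerChar char) ((d.get? (PySem.Chars.lowerChar char)).getD 0 + 1)
        else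
          d.insert (PySem.Chars.lowerChar char) 1)
        = (fun d char => d.insert (PySem.Chars.lowerChar char)
            (d.getD (PySem.Chars.lowerChar char) 0 + 1)) := by
      funext d c; exact stepA_eq_counter_step d c
    rw [hstep, ← PySem.Dict.foldl_insert_getD_add_one_eq_counter, List.foldl_map]
  rw [hfold, List.nodup_iff_count_le_one]
  simp only [List.all_eq_true, decide_eq_true_eq]
  set m := word.toList.map PySem.Chars.lowerChar with hm
  constructor
  · intro h a
    by_cases ha : a ∈ m
    · have hmem : ((m.count a : Int)) ∈ (PySem.Dict.counter m).values := by
        simp [PySem.Dict.values, PySem.Dict.items_counter]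
        exact ⟨a, by simpa using ha, rfl⟩
      have := h _ hmem
      exact_mod_cast this
    · simp [List.count_eq_zero_of_not_mem ha]
  · intro h v hv
    simp [PySem.Dict.values, PySem.Dict.items_counter] at hv
    obtain ⟨a, _, rfl⟩ := hv
    exact_mod_cast h a

-- On a ≤-sorted list, "no two adjacent elements are equal" is strict pairwise increase.
theorem adj_ne_iff_pairwise_lt (s : List Char) (hs : s.Pairwise (· ≤ ·)) :
    ((s.zip s.tail).all (fun p => p.1 != p.2)) = true ↔ s.Pairwise (· < ·) := by
  induction s with
  | nil => simp
  | cons a t ih =>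
    rcases List.pairwise_cons.mp hs with ⟨hat, ht⟩
    cases t with
    | nil => simp
    | cons b t' =>
      rcases List.pairwise_cons.mp ht with ⟨hbt, _⟩
      have hrec := ih ht
      simp only [List.tail_cons, List.zip_cons_cons, List.all_cons, Bool.and_eq_true,
        bne_iff_ne, ne_eq] at *
      constructor
      · rintro ⟨hab, hrest⟩
        have hlt := hrec.mp hrest
        refine List.pairwise_cons.mpr ⟨?_, hlt⟩
        intro c hc
        have hab' : a < b := lt_of_le_of_ne (hat b (by simp)) hab
        rcases List.mem_cons.mp hc with rfl | hc'
        · exact hab'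
        · exact lt_trans hab' ((List.pairwise_cons.mp hlt).1 c hc')
      · intro hlt
        rcases List.pairwise_cons.mp hlt with ⟨halt, hlt'⟩
        exact ⟨ne_of_lt (halt b (by simp)), hrec.mpr hlt'⟩

-- B's per-word test holds iff the lowered character list has no duplicates.
theorem condB_iff_nodup (word : String) :
    (((PySem.List.sorted (word.toList.map PySem.Chars.lowerChar) (fun x => x) false).zip
       (PySem.List.sorted (word.toList.map PySem.Chars.lowerChar) (fun x => x) false).tail).all
       (fun p => p.1 != p.2)) = true
    ↔ (word.toList.map PySem.Chars.lowerChar).Nodup := by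
  set m := word.toList.map PySem.Chars.lowerChar with hm
  set s := PySem.List.sorted m (fun x => x) false with hsdef
  have hperm : s.Perm m := PySem.List.sorted_perm m (fun x => x) false
  have hsort : s.Pairwise (· ≤ ·) := by
    have := PySem.List.sorted_pairwise (xs := m) (key := fun x => x)
    simpa using this
  rw [adj_ne_iff_pairwise_lt s hsort, ← hperm.nodup_iff]
  constructor
  · exact fun h => h.imp ne_of_lt
  · intro h
    exact (hsort.and h).imp (fun hab => lt_of_le_of_ne hab.1 hab.2)

-- ===== VERDICT (by name: the statement is the Claim_ definition above) =====
theorem count_isograms_spec : Claim_equal_count_isograms := by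
  intro list_of_words hdom
  unfold Spec_count_isograms count_isograms count_isograms_alt
  dsimp only
  induction list_of_words using List.reverseRecOn with
  | nil => rfl
  | append_singleton xs w ih =>
    have hx : Dom_count_isograms xs := by
      simp only [Dom_count_isograms, List.all_append, Bool.and_eq_true] at hdom
      exact hdom.1
    rw [List.foldl_append, List.foldl_append, List.foldl_cons, List.foldl_cons,
      List.foldl_nil, List.foldl_nil, ih hx]
    by_cases hc : (w.toList.map PySem.Chars.lowerChar).Nodup
    · rw [if_pos ((condA_iff_nodup w).mpr hc), if_pos ((condB_iff_nodup w).mpr hc)]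
    · rw [if_neg (fun h => hc ((condA_iff_nodup w).mp h)),
        if_neg (fun h => hc ((condB_iff_nodup w).mp h))]
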